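-- pv_equiv track=rewrite | github.com/wanbiguizhao/leetcode | 2144. Minimum Cost of Buying Candies With Discount.py | minimumCost_mine
-- ===== SOURCE A (Python) =====
-- from typing import List
--
-- def minimumCost_mine(cost: List[int]) -> int:
--     # 贪心算法
--     cost.sort(reverse=True)#排序降序
--     i=0
--     ans=0
--     while i+2<len(cost):
--         ans+=cost[i]
--         ans+=cost[i+1]
--         i+=3
--     if i<len(cost):
--         ans+=cost[i]
--         i+=1
--     if i<len(cost):
--         ans+=cost[i]
--     return ans
-- ===== SOURCE B (Python) =====
-- from typing import List
--
-- def minimumCost_mine(cost: List[int]) -> int: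
--     # Count multiplicities once, then walk the DISTINCT values in descending order:
--     # for a run of m equal values starting at overall position pos, the number of
--     # free (every third) candies in the run is (pos+m)//3 - pos//3, so the run's
--     # free amount is computed by arithmetic instead of per-element iteration.
--     counts = {}
--     total = 0
--     for c in cost:
--         total += c
--         counts[c] = counts.get(c, 0) + 1
--     free = 0
--     pos = 0
--     for v in sorted(counts, reverse=True):
--         m = counts[v]
--         free += v * ((pos + m) // 3 - pos // 3)
--         pos += m
--     return total - free
-- ===== Notes on version B (the rewrite author's own statement) =====
-- stated objective: alternative
-- what changed: B never walks the sorted full list: it builds a multiplicity table in one pass, sorts only the distinct values descending, and computes each run's free amount by the closed form (pos+m)//3 - pos//3, returning total minus free; O(n + d log d) with d distinct values. B does not mutate the input list (A sorts it in place).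
import Mathlib
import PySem

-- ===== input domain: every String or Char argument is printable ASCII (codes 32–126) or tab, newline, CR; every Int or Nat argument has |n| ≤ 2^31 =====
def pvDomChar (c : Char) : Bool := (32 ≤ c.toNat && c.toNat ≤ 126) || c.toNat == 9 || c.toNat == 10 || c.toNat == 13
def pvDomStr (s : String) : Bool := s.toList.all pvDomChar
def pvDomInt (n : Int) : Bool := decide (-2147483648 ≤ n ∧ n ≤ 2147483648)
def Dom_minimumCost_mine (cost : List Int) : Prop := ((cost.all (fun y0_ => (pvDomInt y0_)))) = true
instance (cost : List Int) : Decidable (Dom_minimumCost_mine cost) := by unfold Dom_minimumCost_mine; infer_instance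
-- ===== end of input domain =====

-- B counts multiplicities once, sorts only the distinct values, and prices each run of equal
-- values by the closed form (pos+m)//3 - pos//3 (objective: alternative). Return value only:
-- A sorts the argument list in place, B does not mutate it.

-- ===== PORT A =====
-- the 'while i+2 < len(cost)' loop: state (i, ans), stride 3
def aWhile (s : List Int) (i : Nat) (ans : Int) : Nat × Int :=
  if i + 2 < s.length then
    aWhile s (i + 3) (ans + s.getD i 0 + s.getD (i + 1) 0)
  else (i, ans)
termination_by s.length - i

-- the two trailing 'if i < len(cost)' fix-ups of A
def aFin (s : List Int) (p : Nat × Int) : Int :=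
  let p2 := if p.1 < s.length then (p.1 + 1, p.2 + s.getD p.1 0) else p
  if p2.1 < s.length then p2.2 + s.getD p2.1 0 else p2.2

def minimumCost_mine (cost : List Int) : Int :=
  let s := PySem.List.sorted cost (fun x => x) true   -- cost.sort(reverse=True)
  aFin s (aWhile s 0 0)

-- ===== PORT B =====
def minimumCost_mine_alt (cost : List Int) : Int :=
  -- 'for c in cost: total += c; counts[c] = counts.get(c, 0) + 1'
  let p := cost.foldl
    (fun (st : PySem.Dict Int Int × Int) c => (st.1.insert c (st.1.getD c 0 + 1), st.2 + c))
    (PySem.Dict.empty, 0)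
  -- 'for v in sorted(counts, reverse=True): m = counts[v]; free += v*((pos+m)//3 - pos//3); pos += m'
  let fp := (PySem.List.sorted p.1.keys (fun x => x) true).foldl
    (fun (fp : Int × Int) v =>
      let m := p.1.getD v 0
      (fp.1 + v * (PySem.Int.floordiv (fp.2 + m) 3 - PySem.Int.floordiv fp.2 3), fp.2 + m))
    (0, 0)
  p.2 - fp.1

-- ===== PRECONDITION & SPEC =====
def Spec_minimumCost_mine (cost : List Int) (out : Int) : Prop := out = minimumCost_mine_alt cost
instance (cost : List Int) (out : Int) : Decidable (Spec_minimumCost_mine cost out) := by unfold Spec_minimumCost_mine; infer_instance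

-- ===== CLAIM =====
def Claim_equal_minimumCost_mine : Prop := ∀ (cost : List Int), Dom_minimumCost_mine cost → Spec_minimumCost_mine cost (minimumCost_mine cost)

-- ===== LEMMAS AND PROOFS =====

-- sum of a list with every third element (in order) dropped: what A computes on the sorted list
def skipSum : List Int → Int
  | a :: b :: _ :: r => a + b + skipSum r
  | s => s.sum

-- A's loop + fix-ups compute skipSum of the sorted list
theorem aMain (n : Nat) : ∀ (s : List Int) (i : Nat), s.length - i ≤ n → ∀ ans,
    aFin s (aWhile s i ans) = ans + skipSum (s.drop i) := by
  induction n with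
  | zero =>
    intro s i h ans
    have hi : s.length ≤ i := by omega
    rw [aWhile]
    simp only [if_neg (by omega : ¬ i + 2 < s.length)]
    simp [aFin, if_neg (by omega : ¬ i < s.length), List.drop_eq_nil_of_le hi, skipSum]
  | succ n ih =>
    intro s i h ans
    by_cases hc : i + 2 < s.length
    · rw [aWhile, if_pos hc]
      rw [ih s (i + 3) (by omega) _]
      have h0 : i < s.length := by omega
      have h1 : i + 1 < s.length := by omega
      have hd : s.drop i = s[i] :: s[i+1] :: s[i+2] :: s.drop (i+3) := by
        rw [List.drop_eq_getElem_cons h0, List.drop_eq_getElem_cons h1,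
            List.drop_eq_getElem_cons hc]
      rw [hd, skipSum, List.getD_eq_getElem s 0 h0, List.getD_eq_getElem s 0 h1]
      ring
    · rw [aWhile, if_neg hc]
      by_cases h0 : i < s.length
      · have hd0 : s.drop i = s[i] :: s.drop (i+1) := List.drop_eq_getElem_cons h0
        by_cases h1 : i + 1 < s.length
        · have hd1 : s.drop (i+1) = s[i+1] :: s.drop (i+2) := List.drop_eq_getElem_cons h1
          have hd2 : s.drop (i+2) = [] := List.drop_eq_nil_of_le (by omega)
          simp [aFin, h0, h1, hd0, hd1, hd2, skipSum]
          ring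
        · have hd1 : s.drop (i+1) = [] := List.drop_eq_nil_of_le (by omega)
          simp [aFin, h0, h1, hd0, hd1, skipSum]
      · simp [aFin, h0, List.drop_eq_nil_of_le (by omega : s.length ≤ i), skipSum]

-- sum of the elements at absolute positions ≡ 2 (mod 3): the 'free' candies
def posFree : Nat → List Int → Int
  | _, [] => 0
  | p, a :: r => (if p % 3 = 2 then a else 0) + posFree (p + 1) r

theorem posFree_add_three (l : List Int) : ∀ p, posFree (p + 3) l = posFree p l := by
  induction l with
  | nil => intro p; rfl
  | cons a r ih =>
    intro p
    show (if (p + 3) % 3 = 2 then a else 0) + posFree (p + 3 + 1) r = _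
    rw [show p + 3 + 1 = (p + 1) + 3 by omega, ih]
    have : (p + 3) % 3 = p % 3 := by omega
    rw [this]
    rfl

-- skipSum = total minus every-third positions
theorem skipSum_eq (n : Nat) : ∀ (s : List Int), s.length ≤ n → skipSum s = s.sum - posFree 0 s := by
  induction n with
  | zero =>
    intro s hs
    rcases s with _ | ⟨a, r⟩
    · simp [skipSum, posFree]
    · simp at hs
  | succ n ih =>
    intro s hs
    rcases s with _ | ⟨a, _ | ⟨b, _ | ⟨c, r⟩⟩⟩
    · simp [skipSum, posFree]
    · simp [skipSum, posFree]
    · simp [skipSum, posFree]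
    · have hr : r.length ≤ n := by simp at hs; omega
      show a + b + skipSum r = _
      rw [ih r hr]
      simp [posFree, posFree_add_three r 0]
      ring

-- count of positions ≡ 2 (mod 3) inside a run of m equal values starting at position p
theorem posFree_replicate : ∀ (m p : Nat) (v : Int) (rest : List Int),
    posFree p (List.replicate m v ++ rest)
      = v * (((p + m) / 3 - p / 3 : Nat) : Int) + posFree (p + m) rest := by
  intro m
  induction m with
  | zero => intro p v rest; simp
  | succ m ih =>
    intro p v rest
    rw [List.replicate_succ, List.cons_append]
    show (if p % 3 = 2 then v else 0) + posFree (p + 1) (List.replicate m v ++ rest) = _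
    rw [ih (p + 1) v rest]
    have hcoef : (if p % 3 = 2 then (1 : Nat) else 0) + ((p + 1 + m) / 3 - (p + 1) / 3)
        = (p + (m + 1)) / 3 - p / 3 := by
      split_ifs with h <;> omega
    have : (p + 1) + m = p + (m + 1) := by omega
    rw [this]
    split_ifs with h
    · have h1 : (1 : Nat) + ((p + 1 + m) / 3 - (p + 1) / 3) = (p + (m + 1)) / 3 - p / 3 := by
        simpa [h] using hcoef
      push_cast [← h1]
      ring_nf
    · have h1 : (p + 1 + m) / 3 - (p + 1) / 3 = (p + (m + 1)) / 3 - p / 3 := by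
        simpa [h] using hcoef
      rw [← h1]
      ring_nf

-- a // 3 on a nonnegative Python int is Nat division
theorem fd_nat (a : Nat) : PySem.Int.floordiv ((a : Nat) : Int) 3 = ((a / 3 : Nat) : Int) := by
  rw [show (3 : Int) = ((3 : Nat) : Int) from rfl]
  exact PySem.Int.floordiv_natCast a 3

-- B's second loop over the distinct values computes posFree of the run-expansion
theorem runs_fold (d : PySem.Dict Int Int) (m : Int → Nat)
    (hm : ∀ v, d.getD v 0 = (m v : Int)) :
    ∀ (ks : List Int) (free : Int) (p : Nat),
    (ks.foldl
      (fun (fp : Int × Int) v =>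
        (fp.1 + v * (PySem.Int.floordiv (fp.2 + d.getD v 0) 3 - PySem.Int.floordiv fp.2 3),
         fp.2 + d.getD v 0))
      (free, (p : Int))).1
      = free + posFree p (ks.flatMap (fun v => List.replicate (m v) v)) := by
  intro ks
  induction ks with
  | nil => intro free p; simp [posFree]
  | cons v ks ih =>
    intro free p
    rw [List.foldl_cons]
    simp only [hm v]
    have hcast : (p : Int) + (m v : Int) = ((p + m v : Nat) : Int) := by push_cast; ring
    rw [hcast, fd_nat, fd_nat]
    rw [ih (free + v * (((p + m v) / 3 : Nat) - ((p / 3 : Nat) : Int))) (p + m v)]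
    rw [List.flatMap_cons, posFree_replicate (m v) p v]
    have hle : p / 3 ≤ (p + m v) / 3 := Nat.div_le_div_right (by omega)
    have : ((((p + m v) / 3 - p / 3 : Nat)) : Int) = (((p + m v) / 3 : Nat) : Int) - ((p / 3 : Nat) : Int) := by
      omega
    rw [this]
    ring

-- count of a value in the run-expansion
theorem count_flat (f : Int → Nat) : ∀ (ks : List Int), ks.Nodup → ∀ w,
    (ks.flatMap (fun v => List.replicate (f v) v)).count w = if w ∈ ks then f w else 0 := by
  intro ks
  induction ks with
  | nil => intro _ w; simp
  | cons v ks ih =>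
    intro hnd w
    rw [List.nodup_cons] at hnd
    obtain ⟨hv, hnd'⟩ := hnd
    rw [List.flatMap_cons, List.count_append, List.count_replicate, ih hnd' w]
    by_cases hw : w = v
    · subst hw; simp [hv]
    · simp [hw, Ne.symm hw]

-- the run-expansion over strictly decreasing values is sorted descending
theorem pairwise_flat (f : Int → Nat) : ∀ (ks : List Int), ks.Pairwise (· > ·) →
    (ks.flatMap (fun v => List.replicate (f v) v)).Pairwise (· ≥ ·) := by
  intro ks
  induction ks with
  | nil => intro _; simp
  | cons v ks ih =>
    intro hp
    rw [List.flatMap_cons]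
    rcases List.pairwise_cons.mp hp with ⟨hv, hp'⟩
    refine List.pairwise_append.mpr ⟨?_, ih hp', ?_⟩
    · exact List.pairwise_replicate.mpr (Or.inr (le_refl v))
    · intro a ha b hb
      rcases List.eq_of_mem_replicate ha with rfl
      obtain ⟨u, hu, hbu⟩ := List.mem_flatMap.mp hb
      rw [List.eq_of_mem_replicate hbu]
      exact le_of_lt (hv u hu)

-- the descending-sorted list IS the run-expansion of its distinct values
theorem flat_eq_sorted (cost : List Int) :
    (PySem.List.sorted (PySem.Set.ofList cost) (fun x => x) true).flatMap
        (fun v => List.replicate (cost.count v) v)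
      = PySem.List.sorted cost (fun x => x) true := by
  set ks := PySem.List.sorted (PySem.Set.ofList cost) (fun x => x) true with hks
  have hperm0 : ks.Perm (PySem.Set.ofList cost) := PySem.List.sorted_perm _ _ _
  have hnd : ks.Nodup := hperm0.nodup_iff.mpr (PySem.Set.nodup_ofList cost)
  have hgt : ks.Pairwise (· > ·) := by
    have h1 : ks.Pairwise (fun a b => (b : Int) ≤ a) := PySem.List.sorted_pairwise_rev _ _
    have := h1.and hnd
    exact this.imp (fun {a b} h => lt_of_le_of_ne h.1 (Ne.symm h.2))
  have hflatperm : (ks.flatMap (fun v => List.replicate (cost.count v) v)).Perm cost := by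
    rw [List.perm_iff_count]
    intro w
    rw [count_flat _ ks hnd w]
    by_cases hw : w ∈ ks
    · simp [hw]
    · have : w ∉ cost := fun h => hw (hperm0.mem_iff.mpr ((PySem.Set.mem_ofList _ _).mpr h))
      simp [hw, List.count_eq_zero_of_not_mem this]
  have hsorted1 : (ks.flatMap (fun v => List.replicate (cost.count v) v)).Pairwise (· ≥ ·) :=
    pairwise_flat _ ks hgt
  have hsorted2 : (PySem.List.sorted cost (fun x => x) true).Pairwise (· ≥ ·) :=
    PySem.List.sorted_pairwise_rev _ _
  have hperm : (ks.flatMap (fun v => List.replicate (cost.count v) v)).Perm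
      (PySem.List.sorted cost (fun x => x) true) :=
    hflatperm.trans (PySem.List.sorted_perm _ _ _).symm
  exact hperm.eq_of_pairwise (fun _ _ _ _ h1 h2 => le_antisymm h2 h1) hsorted1 hsorted2

-- ===== VERDICT =====
theorem minimumCost_mine_spec : Claim_equal_minimumCost_mine := by
  intro cost _
  unfold Spec_minimumCost_mine minimumCost_mine minimumCost_mine_alt
  rw [PySem.List.foldl_prod_mk
    (f := fun (d : PySem.Dict Int Int) c => d.insert c (d.getD c 0 + 1))
    (g := fun (t : Int) c => t + c)]
  simp only [PySem.Dict.foldl_insert_getD_add_one_eq_counter, PySem.Dict.keys_counter]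
  have h2 := runs_fold (PySem.Dict.counter cost) (fun v => cost.count v)
      (fun v => PySem.Dict.getD_counter cost v)
      (PySem.List.sorted (PySem.Set.ofList cost) (fun x => x) true) 0 0
  simp only [Nat.cast_zero] at h2
  rw [h2, flat_eq_sorted cost]
  rw [aMain (PySem.List.sorted cost (fun x => x) true).length _ 0 (by omega) 0, List.drop_zero]
  rw [skipSum_eq (PySem.List.sorted cost (fun x => x) true).length _ (le_refl _)]
  have hsum : (PySem.List.sorted cost (fun x => x) true).sum = cost.sum :=
    (PySem.List.sorted_perm _ _ _).sum_eq
  have htot : cost.foldl (fun (t : Int) c => t + c) 0 = cost.sum := by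
    simpa using PySem.List.foldl_add (g := fun (c : Int) => c) (l := cost) (a := 0)
  rw [hsum, htot]
  ring
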